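-- pv_equiv track=rewrite | github.com/mortenlyn/AdventOfCode | adventofcode2023/day11/main.py | process_columns
-- ===== SOURCE A (Python) =====
-- def process_columns(updated_rows):
--     transposed_data = list(map(list, zip(*updated_rows)))
--
--     updated_columns = []
--
--     for row in transposed_data:
--         if all((x == "." or x == "1000000") for x in row):
--             updated_columns.append(["1000000"] * len(row))
--         else:
--             updated_columns.append(row)
--
--     return updated_columns
-- ===== SOURCE B (Python) =====
-- def process_columns(updated_rows):
--     # Single streaming pass over the rows: maintain, per column, the cells
--     # gathered so far together with a running "all empty" flag; finalize once.
--     it = iter(updated_rows)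
--     try:
--         first = next(it)
--     except StopIteration:
--         return []
--     cols = [([cell], cell == "." or cell == "1000000") for cell in first]
--     for row in it:
--         cols = [(cells + [cell], flag and (cell == "." or cell == "1000000"))
--                 for (cells, flag), cell in zip(cols, row)]
--     n = len(updated_rows)
--     return [["1000000"] * n if flag else cells for cells, flag in cols]
-- ===== Notes on version B (the rewrite author's own statement) =====
-- stated objective: alternative
-- what changed: Single streaming fold over the rows maintaining per-column (cells-so-far, running emptiness flag) accumulators that are finalized once at the end, instead of materialising the transpose and then testing each transposed row.
import Mathlib
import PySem

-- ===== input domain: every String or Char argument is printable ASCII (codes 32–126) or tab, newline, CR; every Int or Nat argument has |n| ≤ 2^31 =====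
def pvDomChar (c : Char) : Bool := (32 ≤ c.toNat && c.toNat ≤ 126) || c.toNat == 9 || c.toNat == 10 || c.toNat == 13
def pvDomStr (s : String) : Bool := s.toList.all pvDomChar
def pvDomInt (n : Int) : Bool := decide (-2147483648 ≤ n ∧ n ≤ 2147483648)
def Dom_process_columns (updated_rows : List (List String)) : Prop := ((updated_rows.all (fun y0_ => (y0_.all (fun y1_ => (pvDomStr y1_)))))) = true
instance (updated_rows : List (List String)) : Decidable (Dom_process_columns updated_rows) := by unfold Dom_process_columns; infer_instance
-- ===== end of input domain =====

-- B: one streaming fold over the rows, maintaining per-column (cells, emptiness-flag) accumulators finalized at the end, instead of A's transpose-then-test; same return value.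
-- ===== PORT A =====
-- zip(*updated_rows): columns 0..min-1 of the rows ([] for no rows); exact since zip truncates to the shortest row
def pcZipStar (rows : List (List String)) : List (List String) :=
  match rows with
  | [] => []
  | r :: rs =>
    let n := rs.foldl (fun m x => min m x.length) r.length
    (List.range n).map (fun c => rows.map (fun row => row.getD c ""))

def process_columns (updated_rows : List (List String)) : List (List String) :=
  let transposed_data := pcZipStar updated_rows
  transposed_data.foldl (fun updated_columns row =>
    if row.all (fun x => x == "." || x == "1000000") then
      updated_columns ++ [List.replicate row.length "1000000"]
    else
      updated_columns ++ [row]) []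

-- ===== PORT B =====
-- one step of the streaming pass: extend each column with this row's cell, AND the flag
def pcStep (cols : List (List String × Bool)) (row : List String) : List (List String × Bool) :=
  (cols.zip row).map (fun p => (p.1.1 ++ [p.2], p.1.2 && (p.2 == "." || p.2 == "1000000")))

def process_columns_alt (updated_rows : List (List String)) : List (List String) :=
  match updated_rows with
  | [] => []
  | first :: rest =>
    let init := first.map (fun cell => ([cell], cell == "." || cell == "1000000"))
    let cols := rest.foldl pcStep init
    let n := updated_rows.length
    cols.map (fun p => if p.2 then List.replicate n "1000000" else p.1)

-- ===== PRECONDITION & SPEC =====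
def Spec_process_columns (updated_rows : List (List String)) (out : List (List String)) : Prop := out = process_columns_alt updated_rows
instance (updated_rows : List (List String)) (out : List (List String)) : Decidable (Spec_process_columns updated_rows out) := by unfold Spec_process_columns; infer_instance

-- ===== CLAIM (what is proved, stated in full; the proofs are below) =====
def Claim_equal_process_columns : Prop := ∀ (updated_rows : List (List String)), Dom_process_columns updated_rows → Spec_process_columns updated_rows (process_columns updated_rows)

-- ===== LEMMAS AND PROOFS =====

theorem pc_foldl_append (l : List (List String)) (acc : List (List String)) :
    l.foldl (fun updated_columns row =>
      if row.all (fun x => x == "." || x == "1000000") then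
        updated_columns ++ [List.replicate row.length "1000000"]
      else
        updated_columns ++ [row]) acc
    = acc ++ l.map (fun row =>
        if row.all (fun x => x == "." || x == "1000000") then
          List.replicate row.length "1000000" else row) := by
  induction l generalizing acc with
  | nil => simp
  | cons h t ih =>
    rw [List.foldl_cons, ih]
    by_cases hp : (h.all fun x => x == "." || x == "1000000") = true
    · simp only [List.map_cons, if_pos hp, List.append_assoc, List.singleton_append]
    · simp only [List.map_cons, if_neg hp, List.append_assoc, List.singleton_append]

theorem pc_foldl_min_le (l : List (List String)) (a : Nat) :
    l.foldl (fun m x => min m x.length) a ≤ a := by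
  induction l generalizing a with
  | nil => simp
  | cons h t ih => exact le_trans (ih (min a h.length)) (min_le_left _ _)

-- characterisation of the streaming fold: it computes, for each surviving column,
-- the accumulated cells extended by that column's cells in rs, and the ANDed flag
theorem pc_foldl_pcStep (rs : List (List String)) (acc : List (List String × Bool)) :
    rs.foldl pcStep acc
    = (List.range (rs.foldl (fun m x => min m x.length) acc.length)).map
        (fun c => ((acc.getD c ([], false)).1 ++ rs.map (fun r => r.getD c ""),
                   (acc.getD c ([], false)).2 &&
                     rs.all (fun r => r.getD c "" == "." || r.getD c "" == "1000000"))) := by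
  induction rs generalizing acc with
  | nil =>
    simp only [List.foldl_nil, List.map_nil, List.all_nil, List.append_nil, Bool.and_true]
    apply List.ext_getElem
    · simp
    · intro i h1 h2
      simp_all [List.getD]
  | cons r rs ih =>
    rw [List.foldl_cons, ih]
    have hlen : (pcStep acc r).length = min acc.length r.length := by
      simp [pcStep]
    rw [hlen]
    apply List.map_congr_left
    intro c hc
    have hc' : c < min acc.length r.length := by
      have h1 := List.mem_range.mp hc
      have h2 := pc_foldl_min_le rs (min acc.length r.length)
      omega
    have hstep : (pcStep acc r).getD c ([], false)
        = ((acc.getD c ([], false)).1 ++ [r.getD c ""],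
           (acc.getD c ([], false)).2 && (r.getD c "" == "." || r.getD c "" == "1000000")) := by
      have h1 : c < acc.length := lt_of_lt_of_le hc' (min_le_left _ _)
      have h2 : c < r.length := lt_of_lt_of_le hc' (min_le_right _ _)
      have hc2 : c < (acc.zip r).length := by simp [List.length_zip]; omega
      unfold pcStep
      rw [List.getD_eq_getElem _ _ (by simpa using hc2), List.getD_eq_getElem _ _ h1,
          List.getD_eq_getElem _ _ h2]
      simp [List.getElem_zip]
    rw [hstep]
    simp [List.all_cons, List.map_cons, Bool.and_assoc, List.append_assoc]

theorem pc_alt_cons (r : List String) (rs : List (List String)) :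
    process_columns_alt (r :: rs)
    = ((rs.foldl pcStep (r.map (fun cell => ([cell], cell == "." || cell == "1000000")))).map
        (fun p => if p.2 then List.replicate (r :: rs).length "1000000" else p.1)) := rfl

-- ===== VERDICT (by name: the statement is the Claim_ definition above) =====
theorem process_columns_spec : Claim_equal_process_columns := by
  intro rows _
  unfold Spec_process_columns process_columns pcZipStar
  cases rows with
  | nil => simp [process_columns_alt]
  | cons r rs =>
    rw [pc_alt_cons, pc_foldl_append, List.nil_append, List.map_map, pc_foldl_pcStep]
    have hlen : (r.map (fun cell => ([cell], cell == "." || cell == "1000000"))).length = r.length := by simp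
    rw [hlen, List.map_map]
    apply List.map_congr_left
    intro c hc
    have hc' : c < rs.foldl (fun m x => min m x.length) r.length := List.mem_range.mp hc
    have hcr : c < r.length := by
      have := pc_foldl_min_le rs r.length
      omega
    have hinit : ((r.map (fun cell => ([cell], cell == "." || cell == "1000000"))).getD c ([], false))
        = ([r.getD c ""], r.getD c "" == "." || r.getD c "" == "1000000") := by
      simp [List.getD, hcr]
    simp only [Function.comp, hinit]
    by_cases hp : (((r :: rs).map (fun row => row.getD c "")).all
        (fun x => x == "." || x == "1000000")) = true <;>
      simp_all [List.all_map, Function.comp, List.all_cons]
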